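-- pv_equiv track=rewrite | github.com/snu-micc/uspto-revisit | reaction_step_processing_utils.py | segmentation
-- ===== SOURCE A (Python) =====
-- def segmentation(intermediates_list,products_list):
--     breakpoints = set()
--     for i, intermediates in enumerate(intermediates_list):
--         if any(product in intermediates[1] for product in products_list):
--             breakpoints.add(i)
--
--     segments = []
--     start = 0
--     for point in sorted(breakpoints):
--         segments.append(list(range(start,point+1)))
--         start = point+1
--     return segments
-- ===== SOURCE B (Python) =====
-- def segmentation(intermediates_list, products_list):
--     segments = []
--     current = []
--     for i, intermediates in enumerate(intermediates_list):
--         current.append(i)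
--         if any(product in intermediates[1] for product in products_list):
--             segments.append(current)
--             current = []
--     return segments
-- ===== Notes on version B (the rewrite author's own statement) =====
-- stated objective: simpler
-- what changed: B replaces A's staged breakpoint-set + sort + range-building pass by one scan that accumulates the current segment list itself, flushing it whenever a product is found; no index set, no sort, no range arithmetic.
import Mathlib
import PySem

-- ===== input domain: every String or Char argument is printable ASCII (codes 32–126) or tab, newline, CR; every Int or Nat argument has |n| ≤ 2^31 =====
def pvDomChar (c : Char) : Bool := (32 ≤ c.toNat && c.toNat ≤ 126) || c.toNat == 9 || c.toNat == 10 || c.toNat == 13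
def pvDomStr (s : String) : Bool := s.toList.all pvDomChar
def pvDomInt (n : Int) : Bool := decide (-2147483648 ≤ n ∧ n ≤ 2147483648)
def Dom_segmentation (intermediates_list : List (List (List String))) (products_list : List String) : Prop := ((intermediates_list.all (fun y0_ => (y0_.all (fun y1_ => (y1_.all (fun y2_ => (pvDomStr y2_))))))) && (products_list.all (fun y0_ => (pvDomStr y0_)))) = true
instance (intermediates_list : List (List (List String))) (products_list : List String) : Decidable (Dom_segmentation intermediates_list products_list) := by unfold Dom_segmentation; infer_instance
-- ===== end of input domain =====

-- B replaces A's breakpoint set + sort + range-building pass by one scan that accumulates the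
-- current segment list itself, flushing it on each product hit (simpler; no sort, no ranges).

-- ===== PORT A =====
-- `any(product in intermediates[1] for product in products_list)` (identical text in both Pythons);
-- intermediates[1] via pyGet? (none = IndexError, excluded by Pre_; getD [] is never reached inside Pre_).
def pvHit (products_list : List String) (intermediates : List (List String)) : Bool :=
  products_list.any (fun product => ((PySem.List.pyGet? intermediates 1).getD []).contains product)

def segmentation (intermediates_list : List (List (List String))) (products_list : List String) : List (List Int) :=
  let breakpoints : PySem.Set Int :=
    (PySem.List.enumerate intermediates_list 0).foldl
      (fun s p => if pvHit products_list p.2 then PySem.Set.add s p.1 else s) PySem.Set.empty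
  let res :=
    (PySem.List.sorted breakpoints (fun x => x) false).foldl
      (fun (acc : List (List Int) × Int) point =>
        (acc.1 ++ [PySem.List.pyRange acc.2 (point + 1) 1], point + 1)) ([], 0)
  res.1

-- ===== PORT B =====
-- state: (segments so far, current segment being built); append i to current, flush on hit.
def segmentation_alt (intermediates_list : List (List (List String))) (products_list : List String) : List (List Int) :=
  let res :=
    (PySem.List.enumerate intermediates_list 0).foldl
      (fun (acc : List (List Int) × List Int) p =>
        let current := acc.2 ++ [p.1]
        if pvHit products_list p.2 then (acc.1 ++ [current], ([] : List Int))
        else (acc.1, current)) ([], [])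
  res.1

-- ===== PRECONDITION & SPEC =====
-- Both Pythons index intermediates[1], evaluated only when products_list is nonempty; Pre_ excludes
-- exactly the inputs where that raises IndexError (in both A and B alike).
def Pre_segmentation (intermediates_list : List (List (List String))) (products_list : List String) : Prop :=
  products_list = [] ∨ ∀ x ∈ intermediates_list, 2 ≤ x.length
instance (intermediates_list : List (List (List String))) (products_list : List String) : Decidable (Pre_segmentation intermediates_list products_list) := by unfold Pre_segmentation; infer_instance

def pvWitness_segmentation : List (List (List String)) × List String :=
  ([[["x"], ["a", "b"]], [["y"], ["c"]]], ["c", "z"])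

def Spec_segmentation (intermediates_list : List (List (List String))) (products_list : List String) (out : List (List Int)) : Prop := out = segmentation_alt intermediates_list products_list
instance (intermediates_list : List (List (List String))) (products_list : List String) (out : List (List Int)) : Decidable (Spec_segmentation intermediates_list products_list out) := by unfold Spec_segmentation; infer_instance

-- ===== CLAIM (what is proved, stated in full; the proofs are below) =====
def Claim_equal_segmentation : Prop := ∀ (intermediates_list : List (List (List String))) (products_list : List String), Dom_segmentation intermediates_list products_list → Pre_segmentation intermediates_list products_list → Spec_segmentation intermediates_list products_list (segmentation intermediates_list products_list)

-- ===== LEMMAS AND PROOFS =====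

-- A's first loop over fresh, strictly increasing indices appends: the resulting set, as a list,
-- is the filtered index list of the enumeration.
theorem pv_bp_fold (products_list : List String) (l : List (List (List String))) (k : Int)
    (s0 : List Int) (h : ∀ x ∈ s0, x < k) :
    (PySem.List.enumerate l k).foldl
      (fun s p => if pvHit products_list p.2 then PySem.Set.add s p.1 else s) s0
    = s0 ++ ((PySem.List.enumerate l k).filter (fun p => pvHit products_list p.2)).map (·.1) := by
  induction l generalizing k s0 with
  | nil => simp [PySem.List.enumerate]
  | cons x xs ih =>
    rw [PySem.List.enumerate_cons]
    by_cases hx : pvHit products_list x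
    · have hk : k ∉ s0 := fun hm => absurd rfl (ne_of_lt (h k hm))
      have hadd : PySem.Set.add s0 k = s0 ++ [k] := by
        simp [PySem.Set.add, PySem.Set.contains, hk]
      simp only [List.foldl_cons, List.filter_cons, hx, if_pos, hadd]
      rw [ih (k + 1) (s0 ++ [k]) ?_]
      · simp
      · intro y hy
        rcases List.mem_append.1 hy with hy | hy
        · exact lt_trans (h y hy) (by omega)
        · simp at hy; omega
    · simp only [List.foldl_cons, List.filter_cons, hx, if_neg, Bool.false_eq_true,
        not_false_iff]
      exact ih (k + 1) s0 (fun y hy => lt_trans (h y hy) (by omega))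

-- The indices of an enumeration are strictly increasing, and filtering preserves that.
theorem pv_bp_pairwise (products_list : List String) (l : List (List (List String))) (k : Int) :
    (((PySem.List.enumerate l k).filter (fun p => pvHit products_list p.2)).map (·.1)).Pairwise (· < ·) := by
  have h1 : (PySem.List.enumerate l k).Pairwise (fun a b => a.1 < b.1) := by
    induction l generalizing k with
    | nil => simp [PySem.List.enumerate]
    | cons x xs ih =>
      rw [PySem.List.enumerate_cons]
      refine List.Pairwise.cons ?_ (ih (k + 1))
      intro p hp
      have : p.1 ∈ (PySem.List.enumerate xs (k + 1)).map (·.1) := List.mem_map_of_mem hp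
      rw [PySem.List.map_fst_enumerate] at this
      have := (PySem.List.mem_pyRange_one).1 this
      omega
  exact List.pairwise_map.2 (List.Pairwise.filter _ h1)

-- B's current-segment fold, started with current = range(start, k), computes the same segments
-- as A's second fold over the filtered index list started at `start`.
theorem pv_fuse (products_list : List String) (l : List (List (List String))) (k start : Int)
    (segs : List (List Int)) (cur : List Int)
    (hcur : cur = PySem.List.pyRange start k 1) (h : start ≤ k) :
    ((PySem.List.enumerate l k).foldl
      (fun (acc : List (List Int) × List Int) p =>
        let current := acc.2 ++ [p.1]
        if pvHit products_list p.2 then (acc.1 ++ [current], ([] : List Int))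
        else (acc.1, current)) (segs, cur)).1
    = ((((PySem.List.enumerate l k).filter (fun p => pvHit products_list p.2)).map (·.1)).foldl
        (fun (acc : List (List Int) × Int) point =>
          (acc.1 ++ [PySem.List.pyRange acc.2 (point + 1) 1], point + 1)) (segs, start)).1 := by
  induction l generalizing k start segs cur with
  | nil => simp [PySem.List.enumerate]
  | cons x xs ih =>
    rw [PySem.List.enumerate_cons]
    have hstep : cur ++ [k] = PySem.List.pyRange start (k + 1) 1 := by
      rw [hcur, ← PySem.List.pyRange_one_succ_right h]
    by_cases hx : pvHit products_list x
    · simp only [List.foldl_cons, List.filter_cons, hx, if_pos, List.map_cons]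
      rw [hstep]
      exact ih (k + 1) (k + 1) _ [] (PySem.List.pyRange_one_eq_nil le_rfl).symm le_rfl
    · simp only [List.foldl_cons, List.filter_cons, hx, if_neg, Bool.false_eq_true,
        not_false_iff]
      exact ih (k + 1) start segs (cur ++ [k]) hstep (by omega)

-- ===== VERDICT (by name: the statement is the Claim_ definition above) =====
theorem segmentation_spec : Claim_equal_segmentation := by
  intro intermediates_list products_list _ _
  show segmentation intermediates_list products_list = segmentation_alt intermediates_list products_list
  simp only [segmentation, segmentation_alt]
  rw [pv_bp_fold products_list intermediates_list 0 PySem.Set.empty (by simp [PySem.Set.empty])]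
  rw [show (PySem.Set.empty : PySem.Set Int) ++
      ((PySem.List.enumerate intermediates_list 0).filter (fun p => pvHit products_list p.2)).map (·.1)
    = ((PySem.List.enumerate intermediates_list 0).filter (fun p => pvHit products_list p.2)).map (·.1)
    from List.nil_append _]
  rw [PySem.List.sorted_eq_self_of_pairwise _ _
    ((pv_bp_pairwise products_list intermediates_list 0).imp (fun h => le_of_lt h))]
  exact (pv_fuse products_list intermediates_list 0 0 [] []
    (PySem.List.pyRange_one_eq_nil le_rfl).symm le_rfl).symm
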